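-- pv_equiv track=rewrite | github.com/lennihein/aoe2-match-history | aoe2_match_history.py | bucket_label
-- ===== SOURCE A (Python) =====
-- DURATION_BUCKETS = [
--     ("< 5m", 0, 5 * 60),
--     ("5-15m", 5 * 60, 15 * 60),
--     ("15-25m", 15 * 60, 25 * 60),
--     ("25-40m", 25 * 60, 40 * 60),
--     (">= 40m", 40 * 60, None),
-- ]
--
-- def bucket_label(seconds: int):
--     if seconds is None:
--         return None
--     for label, lower, upper in DURATION_BUCKETS:
--         if upper is None and seconds >= lower:
--             return label
--         if upper is not None and lower <= seconds < upper:
--             return label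
--     return None
-- ===== SOURCE B (Python) =====
-- _BOUNDS = [300, 900, 1500, 2400]
-- _LABELS = ["< 5m", "5-15m", "15-25m", "25-40m", ">= 40m"]
--
-- def bucket_label(seconds):
--     if seconds is None or seconds < 0:
--         return None
--     # binary search for the first boundary strictly greater than seconds
--     lo, hi = 0, len(_BOUNDS)
--     while lo < hi:
--         mid = (lo + hi) // 2
--         if seconds < _BOUNDS[mid]:
--             hi = mid
--         else:
--             lo = mid + 1
--     return _LABELS[lo]
-- ===== Notes on version B (the rewrite author's own statement) =====
-- stated objective: idiomatic
-- what changed: Replaces the linear scan over (label, lower, upper) range tuples with a hand-written binary search into a sorted boundary array paired with a parallel label list (half-open bisect-right convention), with an explicit negative guard matching A's fall-through None.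
import Mathlib
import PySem

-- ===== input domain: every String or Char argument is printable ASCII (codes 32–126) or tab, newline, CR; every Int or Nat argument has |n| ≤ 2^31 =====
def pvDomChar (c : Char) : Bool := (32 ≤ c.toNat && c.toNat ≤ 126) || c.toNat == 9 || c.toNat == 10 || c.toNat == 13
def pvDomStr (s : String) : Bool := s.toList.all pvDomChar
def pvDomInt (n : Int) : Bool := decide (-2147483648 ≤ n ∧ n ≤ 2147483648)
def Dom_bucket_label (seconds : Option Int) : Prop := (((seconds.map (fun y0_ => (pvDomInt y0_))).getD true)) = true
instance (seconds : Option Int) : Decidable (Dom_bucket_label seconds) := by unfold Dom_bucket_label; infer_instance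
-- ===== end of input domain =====

-- ===== PORT A =====
-- One honest line: B replaces A's linear scan of range tuples with a binary
-- search over a sorted boundary array and a parallel label list (idiomatic).
def bucketsA : List (String × Int × Option Int) :=
  [("< 5m", 0, some 300), ("5-15m", 300, some 900), ("15-25m", 900, some 1500),
   ("25-40m", 1500, some 2400), (">= 40m", 2400, none)]

def loopA : List (String × Int × Option Int) → Int → Option String
  | [], _ => none
  | (label, lower, upper) :: rest, s =>
    match upper with
    | none => if s ≥ lower then some label else loopA rest s
    | some u => if lower ≤ s ∧ s < u then some label else loopA rest s

def bucket_label (seconds : Option Int) : Option String :=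
  match seconds with
  | none => none
  | some s => loopA bucketsA s

-- ===== PORT B =====
def boundsB : List Int := [300, 900, 1500, 2400]
def labelsB : List String := ["< 5m", "5-15m", "15-25m", "25-40m", ">= 40m"]

-- the while-loop of Source B: binary search on indices lo..hi.
-- fuel (= hi - lo at the call) only makes the recursion structural; each step
-- mirrors one loop iteration, with mid = (lo + hi) // 2 inlined.
def bsearchGo (s : Int) : Nat → Nat → Nat → Nat
  | 0, lo, _ => lo
  | fuel + 1, lo, hi =>
    if lo < hi then
      if s < boundsB.getD ((lo + hi) / 2) 0 then bsearchGo s fuel lo ((lo + hi) / 2)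
      else bsearchGo s fuel ((lo + hi) / 2 + 1) hi
    else lo

def bsearchB (s : Int) (lo hi : Nat) : Nat := bsearchGo s (hi - lo) lo hi

def bucket_label_alt (seconds : Option Int) : Option String :=
  match seconds with
  | none => none
  | some s =>
    if s < 0 then none
    else some (labelsB.getD (bsearchB s 0 boundsB.length) "")  -- _LABELS[lo]: index always in range

-- ===== PRECONDITION & SPEC =====
def Spec_bucket_label (seconds : Option Int) (out : Option String) : Prop := out = bucket_label_alt seconds
instance (seconds : Option Int) (out : Option String) : Decidable (Spec_bucket_label seconds out) := by unfold Spec_bucket_label; infer_instance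

-- ===== CLAIM (what is proved, stated in full; the proofs are below) =====
def Claim_equal_bucket_label : Prop := ∀ (seconds : Option Int), Dom_bucket_label seconds → Spec_bucket_label seconds (bucket_label seconds)

-- ===== LEMMAS AND PROOFS =====
theorem bsearchB_eval (s : Int) :
    bsearchB s 0 boundsB.length =
      if s < 1500 then (if s < 900 then (if s < 300 then 0 else 1) else 2)
      else if s < 2400 then 3 else 4 := by
  norm_num [bsearchB, bsearchGo, boundsB]

-- ===== VERDICT (by name: the statement is the Claim_ definition above) =====
theorem bucket_label_spec : Claim_equal_bucket_label := by
  intro seconds _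
  unfold Spec_bucket_label bucket_label bucket_label_alt
  cases seconds with
  | none => rfl
  | some s =>
    simp only [bsearchB_eval, loopA, bucketsA]
    split_ifs <;> first
      | rfl
      | omega
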